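-- pv_equiv track=rewrite | github.com/boris-volkov/Python | algos/permutations.py | pointer_top
-- ===== SOURCE A (Python) =====
-- green       = '\u001b[38;2;40;250;40m'
--
-- teal = '\u001b[38;2;63;94;143m'
--
-- dot = '●'
--
-- def pointer_top(sym,x,a,b = None,first_found = False, second_found = False):
--     s = teal
--     for i in range(len(x)):
--         if i == a:
--             if first_found == True:
--                 s += green
--                 s += sym
--                 s += teal
--             else:
--                 s += sym
--         elif b != None and i == b:
--             if second_found == True:
--                 s += green
--                 s += sym
--                 s += teal
--             else:
--                 s += sym
--         else:
--             s += dot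
--     return s
-- ===== SOURCE B (Python) =====
-- green = '\u001b[38;2;40;250;40m'
--
-- teal = '\u001b[38;2;63;94;143m'
--
-- dot = '●'
--
-- def pointer_top(sym, x, a, b=None, first_found=False, second_found=False):
--     out = [dot] * len(x)
--     if b is not None and 0 <= b < len(x):
--         out[b] = green + sym + teal if second_found else sym
--     if 0 <= a < len(x):
--         out[a] = green + sym + teal if first_found else sym
--     return teal + ''.join(out)
-- ===== Notes on version B (the rewrite author's own statement) =====
-- stated objective: simpler
-- what changed: Instead of branching on every index in a per-character loop that grows a string, B builds a base list of dots, patches at most two cells (b first, then a so a wins the tie), and joins once.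
import Mathlib
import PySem

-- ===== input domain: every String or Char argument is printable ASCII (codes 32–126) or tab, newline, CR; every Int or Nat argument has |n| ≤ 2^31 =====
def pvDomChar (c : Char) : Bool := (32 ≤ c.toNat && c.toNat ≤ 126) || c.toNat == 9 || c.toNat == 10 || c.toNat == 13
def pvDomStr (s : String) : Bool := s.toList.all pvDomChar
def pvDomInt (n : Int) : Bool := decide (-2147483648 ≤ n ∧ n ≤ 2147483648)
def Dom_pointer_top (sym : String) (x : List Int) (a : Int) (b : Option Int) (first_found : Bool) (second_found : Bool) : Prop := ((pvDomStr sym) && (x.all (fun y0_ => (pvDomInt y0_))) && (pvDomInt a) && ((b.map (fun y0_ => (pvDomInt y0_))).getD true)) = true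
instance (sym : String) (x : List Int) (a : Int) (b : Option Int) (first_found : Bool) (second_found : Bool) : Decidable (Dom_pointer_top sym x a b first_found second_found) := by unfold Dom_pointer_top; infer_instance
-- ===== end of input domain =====

-- ===== PORT A =====
-- B patches at most two cells of a dot list instead of branching per index (objective: simpler); return values proved equal on Dom.
-- string constants of the module, kept as char lists (strings are proved on the List Char side)
def pvGreen : List Char := "\u001b[38;2;40;250;40m".toList
def pvTeal : List Char := "\u001b[38;2;63;94;143m".toList
def pvDot : List Char := "\u25CF".toList

-- literal port of A: for i in range(len(x)): branch, appending to the accumulator s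
def pointer_top (sym : String) (x : List Int) (a : Int) (b : Option Int) (first_found : Bool) (second_found : Bool) : String :=
  String.ofList
    ((PySem.List.pyRange 0 (PySem.List.len x) 1).foldl
      (fun s i =>
        if i = a then
          (if first_found = true then s ++ pvGreen ++ sym.toList ++ pvTeal else s ++ sym.toList)
        else if b ≠ none ∧ b = some i then
          (if second_found = true then s ++ pvGreen ++ sym.toList ++ pvTeal else s ++ sym.toList)
        else s ++ pvDot)
      pvTeal)

-- ===== PORT B =====
-- cell contents for a marked index ('green + sym + teal if found else sym')
def pvCell (symL : List Char) (found : Bool) : List Char :=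
  if found then pvGreen ++ symL ++ pvTeal else symL

-- B's list of cells: base list of dots, patch b then a (a wins the tie)
def pvOut (symL : List Char) (n : Nat) (a : Int) (b : Option Int) (ff sf : Bool) : List (List Char) :=
  let out0 := List.replicate n pvDot
  let out1 := match b with
    | some v => if 0 ≤ v ∧ v < (n : Int) then out0.set v.toNat (pvCell symL sf) else out0
    | none => out0
  if 0 ≤ a ∧ a < (n : Int) then out1.set a.toNat (pvCell symL ff) else out1

-- port of B: teal + ''.join(out)
def pointer_top_alt (sym : String) (x : List Int) (a : Int) (b : Option Int) (first_found : Bool) (second_found : Bool) : String :=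
  String.ofList (pvTeal ++ (pvOut sym.toList x.length a b first_found second_found).flatten)

-- ===== PRECONDITION & SPEC =====
def Spec_pointer_top (sym : String) (x : List Int) (a : Int) (b : Option Int) (first_found : Bool) (second_found : Bool) (out : String) : Prop := out = pointer_top_alt sym x a b first_found second_found
instance (sym : String) (x : List Int) (a : Int) (b : Option Int) (first_found : Bool) (second_found : Bool) (out : String) : Decidable (Spec_pointer_top sym x a b first_found second_found out) := by unfold Spec_pointer_top; infer_instance

-- ===== CLAIM (what is proved, stated in full; the proofs are below) =====
def Claim_equal_pointer_top : Prop := ∀ (sym : String) (x : List Int) (a : Int) (b : Option Int) (first_found : Bool) (second_found : Bool), Dom_pointer_top sym x a b first_found second_found → Spec_pointer_top sym x a b first_found second_found (pointer_top sym x a b first_found second_found)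

-- ===== LEMMAS AND PROOFS =====

-- the per-index cell both programs produce at index i
def pvF (symL : List Char) (a : Int) (b : Option Int) (ff sf : Bool) (i : Int) : List Char :=
  if i = a then pvCell symL ff
  else if b = some i then pvCell symL sf
  else pvDot

lemma pointer_top_eq_flat (sym : String) (x : List Int) (a : Int) (b : Option Int) (ff sf : Bool) :
    pointer_top sym x a b ff sf =
      String.ofList (pvTeal ++ (PySem.List.pyRange 0 (PySem.List.len x) 1).flatMap (pvF sym.toList a b ff sf)) := by
  unfold pointer_top
  have hfun : (fun (s : List Char) (i : Int) =>
        if i = a then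
          (if ff = true then s ++ pvGreen ++ sym.toList ++ pvTeal else s ++ sym.toList)
        else if b ≠ none ∧ b = some i then
          (if sf = true then s ++ pvGreen ++ sym.toList ++ pvTeal else s ++ sym.toList)
        else s ++ pvDot)
      = (fun s i => s ++ pvF sym.toList a b ff sf i) := by
    funext s i
    simp only [pvF, pvCell]
    by_cases hia : i = a
    · cases ff <;> simp [hia, List.append_assoc]
    · by_cases hbi : b = some i
      · have hb : (b ≠ none ∧ b = some i) := ⟨by simp [hbi], hbi⟩
        cases sf <;> simp [hia, hb, List.append_assoc]
      · simp [hia, hbi]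
  rw [hfun, PySem.List.foldl_append_eq_flatMap]

lemma length_pvOut (symL : List Char) (n : Nat) (a : Int) (b : Option Int) (ff sf : Bool) :
    (pvOut symL n a b ff sf).length = n := by
  unfold pvOut
  rcases b with _ | v <;> simp only <;> split_ifs <;> simp

lemma pvOut_eq (symL : List Char) (n : Nat) (a : Int) (b : Option Int) (ff sf : Bool) :
    pvOut symL n a b ff sf = (List.range n).map (fun (k : Nat) => pvF symL a b ff sf (k : Int)) := by
  apply List.ext_getElem
  · simp [length_pvOut]
  · intro j hj hj'
    have hjn : j < n := by simpa [length_pvOut] using hj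
    simp only [List.getElem_map, List.getElem_range]
    unfold pvOut pvF
    rcases b with _ | v <;>
      simp only [Option.some.injEq, reduceCtorEq] <;>
      split_ifs <;>
      simp only [List.getElem_set, List.getElem_replicate] <;>
      split_ifs <;>
      first | rfl | (exfalso; omega)

-- ===== VERDICT (by name: the statement is the Claim_ definition above) =====
theorem pointer_top_spec : Claim_equal_pointer_top := by
  intro sym x a b ff sf _
  unfold Spec_pointer_top
  rw [pointer_top_eq_flat]
  unfold pointer_top_alt
  rw [pvOut_eq, ← List.flatMap_def, PySem.List.len_eq, PySem.List.pyRange_one]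
  simp [List.flatMap_map]
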